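-- pv_equiv track=rewrite | github.com/RodrigoBerino/php_constructor | main.py | generate_php_class
-- ===== SOURCE A (Python) =====
-- def generate_php_class(uml):
--
--     uml = uml.replace("@startuml", "").replace("@enduml", "").strip()
--
--     #linha = input
--     lista_classe = []
--     classe_atual = None
--     corpo_classe = []
-- #    classe_relationship = []
--
--
--     for linha in uml.splitlines(): #percorrer a linha
--         linha = linha.strip()
-- #        if linha == "<|--":
--  #           classe_relationship = []
--         if linha.lower().startswith("Class") or linha.startswith("class"):
--             if classe_atual:
--                 lista_classe.append((classe_atual, corpo_classe))
--             classe_atual = linha.split()[1]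
--             corpo_classe = []
--         elif linha == "}":
--             lista_classe.append((classe_atual, corpo_classe))
--             classe_atual = None
--             corpo_classe = []
--         else:
--             corpo_classe.append(linha)
--
--     php_classes = []
--
--     for class_name, body in lista_classe:
--         php_class = f"<?php\nclass {class_name} {{\n"
--         atributos = []
--         methods = []
--
--          # processamento dos atributos e métodos
--         for line in body:
--             if ":" in line:
--                 parts = line.split(":")
--                 tipo_atributo = parts[0].strip()
--                 nome_atributo = parts[1].strip()
--                 atributos.append((tipo_atributo, nome_atributo))
--             elif "void" in line:
--                 method_name = line.split()[1].split("(")[0].strip()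
--                 methods.append((method_name, "void"))
--
--         #atributos
--         for tipo_atributo, nome_atributo in atributos:
--             php_class += f"$private {nome_atributo};\n"
--         #metodos
--         for method_name, tipo_retorno in methods:
--             php_class += f" public function: {method_name}() {{\n"
--             php_class += f"}}\n"
--
--      #   for _, nome_atributo in atributos:
--       #      php_class += f"\n public function get{nome_atributo.capitalize()}() {{\n"
--        #     php_class += f" return $this-> {nome_atributo}; \n }} \n"
--         #    php_class += f"public function set {nome_atributo.capitalize()}() {{\n"
--          #   php_class += f" $this-> {nome_atributo} = $value \n }} \n"
--
--         php_class += "}\n"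
--         php_classes.append(php_class)
--
--     return "\n".join(php_classes)
-- ===== SOURCE B (Python) =====
-- def generate_php_class(uml):
--     uml = uml.replace("@startuml", "").replace("@enduml", "").strip()
--
--     out = []
--     active = False          # a class is currently open
--     name = None
--     attrs = []              # attribute names, in order of appearance
--     meth_lines = []         # raw method lines; the method name is extracted at flush time
--
--     def flush():
--         pieces = [f"<?php\nclass {name} {{\n"]
--         pieces += [f"$private {a};\n" for a in attrs]
--         pieces += [f" public function: {l.split()[1].split('(')[0].strip()}() {{\n}}\n"
--                    for l in meth_lines]
--         pieces.append("}\n")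
--         out.append("".join(pieces))
--
--     for raw in uml.splitlines():
--         line = raw.strip()
--         if line.startswith("class"):
--             if active:
--                 flush()
--             name = line.split()[1]
--             active = True
--             attrs, meth_lines = [], []
--         elif line == "}":
--             flush()
--             active = False
--             name = None
--             attrs, meth_lines = [], []
--         elif ":" in line:
--             attrs.append(line.split(":")[1].strip())
--         elif "void" in line:
--             meth_lines.append(line)
--
--     return "\n".join(out)
-- ===== Notes on version B (the rewrite author's own statement) =====
-- stated objective: simpler
-- what changed: B fuses A's two phases into one pass: it drops the intermediate list of (class_name, body) tuples and the per-class body re-scan, classifying each line into attributes/method-lines immediately and emitting a class's PHP string (extracting method names then) only at the flush boundaries (a 'class' line or '}').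
import Mathlib
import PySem

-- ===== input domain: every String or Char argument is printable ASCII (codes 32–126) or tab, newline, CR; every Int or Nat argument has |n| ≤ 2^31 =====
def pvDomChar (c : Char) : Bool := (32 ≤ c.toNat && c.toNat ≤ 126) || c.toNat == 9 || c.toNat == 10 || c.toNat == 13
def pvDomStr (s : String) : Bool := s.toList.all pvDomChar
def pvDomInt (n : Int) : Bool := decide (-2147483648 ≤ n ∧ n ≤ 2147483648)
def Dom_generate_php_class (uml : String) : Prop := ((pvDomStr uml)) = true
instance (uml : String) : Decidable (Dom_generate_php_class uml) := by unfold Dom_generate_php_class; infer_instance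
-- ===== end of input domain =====

-- B fuses A's two phases into one pass (no intermediate (class, body) list), extracting method
-- names only when a class is flushed; same return value on Pre_; objective: simpler.

-- shared first line of both Pythons: uml.replace("@startuml","").replace("@enduml","").strip()
def pvClean (uml : String) : List Char :=
  PySem.Chars.strip
    (PySem.Chars.replace (PySem.Chars.replace uml.toList "@startuml".toList []) "@enduml".toList [])

-- rendering of Python's f"{x}" where x is None or a str
def pvNameChars : Option (List Char) → List Char
  | none => "None".toList
  | some s => s

-- ===== PORT A =====
-- phase-1 state: (lista_classe, classe_atual, corpo_classe)
def pvStepA (st : List (Option (List Char) × List (List Char)) × Option (List Char) × List (List Char))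
    (raw : List Char) :
    List (Option (List Char) × List (List Char)) × Option (List Char) × List (List Char) :=
  match st with
  | (lista, cur, corpo) =>
    let l := PySem.Chars.strip raw
    if PySem.Chars.startswith (PySem.Chars.lower l) "Class".toList
        || PySem.Chars.startswith l "class".toList then
      -- Python `if classe_atual:` — classe_atual is None or a (nonempty) split() token, so truthiness = isSome
      let lista' := if cur.isSome then lista ++ [(cur, corpo)] else lista
      (lista', some ((PySem.Chars.split₀ l).getD 1 []), [])  -- linha.split()[1]; [1] exists on Pre_
    else if l = "}".toList then
      (lista ++ [(cur, corpo)], none, [])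
    else
      (lista, cur, corpo ++ [l])

-- phase-2 inner loop over the body: collects (tipo, nome) attributes and (name, "void") methods
def pvStepClassify (am : List (List Char × List Char) × List (List Char × List Char))
    (line : List Char) : List (List Char × List Char) × List (List Char × List Char) :=
  if PySem.Chars.isIn ":".toList line then
    let parts := PySem.Chars.splitOn line ":".toList
    (am.1 ++ [(PySem.Chars.strip (parts.getD 0 []), PySem.Chars.strip (parts.getD 1 []))], am.2)
  else if PySem.Chars.isIn "void".toList line then
    (am.1, am.2 ++
      [(PySem.Chars.strip
          ((PySem.Chars.splitOn ((PySem.Chars.split₀ line).getD 1 []) "(".toList).getD 0 []),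
        "void".toList)])  -- line.split()[1]; [1] exists on Pre_
  else am

def pvRenderA (p : Option (List Char) × List (List Char)) : List Char :=
  let init := "<?php\nclass ".toList ++ pvNameChars p.1 ++ " {\n".toList
  let am := p.2.foldl pvStepClassify ([], [])
  let s1 := am.1.foldl (fun s a => s ++ "$private ".toList ++ a.2 ++ ";\n".toList) init
  let s2 := am.2.foldl
    (fun s m => s ++ " public function: ".toList ++ m.1 ++ "() {\n".toList ++ "}\n".toList) s1
  s2 ++ "}\n".toList

def generate_php_class (uml : String) : String :=
  let fin := (PySem.Chars.splitlines (pvClean uml)).foldl pvStepA ([], none, [])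
  String.ofList (PySem.Chars.join "\n".toList (fin.1.map pvRenderA))

-- ===== PORT B =====
-- Source B's flush-time method-name extraction: l.split()[1].split('(')[0].strip()
def pvExtract (l : List Char) : List Char :=
  PySem.Chars.strip
    ((PySem.Chars.splitOn ((PySem.Chars.split₀ l).getD 1 []) "(".toList).getD 0 [])

-- Source B's flush(): "".join of the pieces list
def pvFlushB (name : Option (List Char)) (attrs meths : List (List Char)) : List Char :=
  PySem.Chars.join []
    (("<?php\nclass ".toList ++ pvNameChars name ++ " {\n".toList)
      :: (attrs.map (fun a => "$private ".toList ++ a ++ ";\n".toList)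
          ++ meths.map (fun l => " public function: ".toList ++ pvExtract l ++ "() {\n}\n".toList)
          ++ ["}\n".toList]))

-- single-pass state: (out, active, name, attrs, meth_lines) — meth_lines keeps the raw lines
def pvStepB (st : List (List Char) × Bool × Option (List Char) × List (List Char) × List (List Char))
    (raw : List Char) :
    List (List Char) × Bool × Option (List Char) × List (List Char) × List (List Char) :=
  match st with
  | (out, active, name, attrs, meths) =>
    let l := PySem.Chars.strip raw
    if PySem.Chars.startswith l "class".toList then
      let out' := if active then out ++ [pvFlushB name attrs meths] else out
      (out', true, some ((PySem.Chars.split₀ l).getD 1 []), [], [])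
    else if l = "}".toList then
      (out ++ [pvFlushB name attrs meths], false, none, [], [])
    else if PySem.Chars.isIn ":".toList l then
      (out, active, name, attrs ++ [PySem.Chars.strip ((PySem.Chars.splitOn l ":".toList).getD 1 [])], meths)
    else if PySem.Chars.isIn "void".toList l then
      (out, active, name, attrs, meths ++ [l])
    else (out, active, name, attrs, meths)

def generate_php_class_alt (uml : String) : String :=
  let fin := (PySem.Chars.splitlines (pvClean uml)).foldl pvStepB ([], false, none, [], [])
  String.ofList (PySem.Chars.join "\n".toList fin.1)

-- ===== PRECONDITION & SPEC =====
def pvLines (uml : String) : List (List Char) :=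
  (PySem.Chars.splitlines (pvClean uml)).map PySem.Chars.strip

def pvIsClassB (l : List Char) : Bool := PySem.Chars.startswith l "class".toList

def pvIsBoundaryB (l : List Char) : Bool := pvIsClassB l || l == "}".toList

-- a class is active just before line i: the latest earlier boundary line is a `class` line
def pvActiveB (ls : List (List Char)) (i : Nat) : Bool :=
  (List.range i).any fun k =>
    pvIsClassB (ls.getD k []) &&
      (List.range i).all fun m => !(decide (k < m)) || !pvIsBoundaryB (ls.getD m [])

-- the body containing line i really gets flushed: the FIRST boundary after i is a `}`,
-- or is a `class` line while a class is active
def pvFlushedB (ls : List (List Char)) (i : Nat) : Bool :=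
  (List.range ls.length).any fun j =>
    decide (i < j) && pvIsBoundaryB (ls.getD j []) &&
      ((List.range j).all fun m => !(decide (i < m)) || !pvIsBoundaryB (ls.getD m [])) &&
      ((ls.getD j []) == "}".toList || pvActiveB ls i)

-- a body line with "void", no ":", and fewer than two whitespace tokens
def pvShortVoidB (l : List Char) : Bool :=
  !pvIsClassB l && !(l == "}".toList) && !PySem.Chars.isIn ":".toList l &&
    PySem.Chars.isIn "void".toList l && decide ((PySem.Chars.split₀ l).length < 2)

-- Pre_ excludes exactly the inputs on which A raises IndexError: a stripped line starting with
-- "class" having fewer than two whitespace tokens, or a token-poor "void" body line whose class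
-- body actually gets flushed (first following boundary is "}", or a "class" line while a class is
-- active); on those B raises the same IndexError.
def Pre_generate_php_class (uml : String) : Prop :=
  ∀ i < (pvLines uml).length,
    (pvIsClassB ((pvLines uml).getD i []) = true →
      2 ≤ (PySem.Chars.split₀ ((pvLines uml).getD i [])).length) ∧
    (pvShortVoidB ((pvLines uml).getD i []) = true → pvFlushedB (pvLines uml) i = false)
instance (uml : String) : Decidable (Pre_generate_php_class uml) := by
  unfold Pre_generate_php_class; infer_instance

def pvWitness_generate_php_class : String := "class Foo {\n nome : idade\n void andar()\n}"

def Spec_generate_php_class (uml : String) (out : String) : Prop := out = generate_php_class_alt uml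
instance (uml : String) (out : String) : Decidable (Spec_generate_php_class uml out) := by
  unfold Spec_generate_php_class; infer_instance

-- ===== CLAIM (what is proved, stated in full; the proofs are below) =====
def Claim_equal_generate_php_class : Prop := ∀ (uml : String), Dom_generate_php_class uml → Pre_generate_php_class uml → Spec_generate_php_class uml (generate_php_class uml)

-- ===== LEMMAS AND PROOFS =====

theorem pvLowerChar_ne_C (c : Char) : PySem.Chars.lowerChar c ≠ 'C' := by
  simp only [PySem.Chars.lowerChar, PySem.Chars.isupper]
  split_ifs with h
  · simp only [Bool.and_eq_true, decide_eq_true_eq, Char.le_def, UInt32.le_iff_toNat_le] at h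
    have hA : ('A').val.toNat = 65 := by decide
    have hZ : ('Z').val.toNat = 90 := by decide
    rw [hA, hZ] at h
    have hcn : c.toNat = c.val.toNat := rfl
    intro hc
    have h2 : (Char.ofNat (c.toNat + 32)).toNat = 'C'.toNat := by rw [hc]
    rw [Char.toNat_ofNat] at h2
    have hv : Nat.isValidChar (c.toNat + 32) := Or.inl (by omega)
    rw [if_pos hv] at h2
    have hC : ('C').toNat = 67 := by decide
    omega
  · intro hc; subst hc; simp at h

-- A's `linha.lower().startswith("Class")` test is never true
theorem pvDead (l : List Char) :
    PySem.Chars.startswith (PySem.Chars.lower l) ['C', 'l', 'a', 's', 's'] = false := by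
  cases l with
  | nil => rfl
  | cons c cs =>
    simp only [PySem.Chars.lower, PySem.Chars.startswith, List.map_cons]
    show ((['C', 'l', 'a', 's', 's']).isPrefixOf (PySem.Chars.lowerChar c :: List.map PySem.Chars.lowerChar cs)) = false
    simp only [List.isPrefixOf, Bool.and_eq_false_iff]
    left
    simp [beq_eq_false_iff_ne]
    exact fun h => pvLowerChar_ne_C c h.symm

theorem pvJoinNil (xss : List (List Char)) : PySem.Chars.join [] xss = xss.flatten := by
  induction xss with
  | nil => rfl
  | cons x rest ih =>
    cases rest with
    | nil => simp [PySem.Chars.join_singleton]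
    | cons y t => rw [PySem.Chars.join_cons_cons]; simp_all

theorem pvFoldlApp {α : Type} (g : α → List Char) (xs : List α) (init : List Char) :
    xs.foldl (fun s a => s ++ g a) init = init ++ (xs.map g).flatten := by
  induction xs generalizing init with
  | nil => simp
  | cons a t ih => simp [ih, List.append_assoc]

def pvAttrsOf (corpo : List (List Char)) : List (List Char) :=
  (corpo.foldl pvStepClassify ([], [])).1.map Prod.snd

-- the raw lines Source B's single pass keeps as meth_lines for this body
def pvMethLines (corpo : List (List Char)) : List (List Char) :=
  corpo.filter fun l =>
    !PySem.Chars.isIn ":".toList l && PySem.Chars.isIn "void".toList l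

theorem pvClassify_snd (corpo : List (List Char)) :
    ∀ a m, (corpo.foldl pvStepClassify (a, m)).2 =
      m ++ (pvMethLines corpo).map (fun l => (pvExtract l, "void".toList)) := by
  induction corpo with
  | nil => intro a m; simp [pvMethLines]
  | cons l t ih =>
    intro a m
    by_cases hc : PySem.Chars.isIn [':'] l = true
    · simp [pvStepClassify, hc, pvMethLines, ih]
    · have hc' : PySem.Chars.isIn [':'] l = false := by simpa using hc
      by_cases hv : PySem.Chars.isIn ['v', 'o', 'i', 'd'] l = true
      · simp [pvStepClassify, hc', hv, pvMethLines, ih, pvExtract]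
      · have hv' : PySem.Chars.isIn ['v', 'o', 'i', 'd'] l = false := by simpa using hv
        simp [pvStepClassify, hc', hv', pvMethLines, ih]

theorem pvRender_eq (name : Option (List Char)) (corpo : List (List Char)) :
    pvRenderA (name, corpo) = pvFlushB name (pvAttrsOf corpo) (pvMethLines corpo) := by
  simp only [pvRenderA, pvFlushB, pvAttrsOf]
  have h1 : (fun (s : List Char) (a : List Char × List Char) =>
      s ++ "$private ".toList ++ a.2 ++ ";\n".toList) =
      fun s a => s ++ ("$private ".toList ++ a.2 ++ ";\n".toList) := by
    funext s a; simp [List.append_assoc]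
  have h2 : (fun (s : List Char) (m : List Char × List Char) =>
      s ++ " public function: ".toList ++ m.1 ++ "() {\n".toList ++ "}\n".toList) =
      fun s m => s ++ (" public function: ".toList ++ m.1 ++ "() {\n".toList ++ "}\n".toList) := by
    funext s m; simp [List.append_assoc]
  rw [h1, h2, pvFoldlApp, pvFoldlApp, pvJoinNil, pvClassify_snd corpo [] []]
  simp [List.map_map, Function.comp_def, List.append_assoc, List.flatten_append]

theorem pvStepA_class (lista : List (Option (List Char) × List (List Char)))
    (cur : Option (List Char)) (corpo : List (List Char)) (raw : List Char)
    (hc : PySem.Chars.startswith (PySem.Chars.strip raw) ['c', 'l', 'a', 's', 's'] = true) :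
    pvStepA (lista, cur, corpo) raw =
      ((if cur.isSome then lista ++ [(cur, corpo)] else lista),
        some ((PySem.Chars.split₀ (PySem.Chars.strip raw)).getD 1 []), []) := by
  simp [pvStepA, pvDead, hc]

theorem pvStepA_brace (lista : List (Option (List Char) × List (List Char)))
    (cur : Option (List Char)) (corpo : List (List Char)) (raw : List Char)
    (hb : PySem.Chars.strip raw = ['}']) :
    pvStepA (lista, cur, corpo) raw = (lista ++ [(cur, corpo)], none, []) := by
  simp [pvStepA, pvDead, hb]; try decide

theorem pvStepA_body (lista : List (Option (List Char) × List (List Char)))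
    (cur : Option (List Char)) (corpo : List (List Char)) (raw : List Char)
    (hc : PySem.Chars.startswith (PySem.Chars.strip raw) ['c', 'l', 'a', 's', 's'] = false)
    (hb : ¬ PySem.Chars.strip raw = ['}']) :
    pvStepA (lista, cur, corpo) raw = (lista, cur, corpo ++ [PySem.Chars.strip raw]) := by
  simp [pvStepA, pvDead, hc, hb]; try decide

theorem pvLoop_eq (lines : List (List Char)) :
    ∀ (lista : List (Option (List Char) × List (List Char))) (cur : Option (List Char))
      (corpo : List (List Char)),
    (lines.foldl pvStepB (lista.map pvRenderA, cur.isSome, cur, pvAttrsOf corpo, pvMethLines corpo)).1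
      = (lines.foldl pvStepA (lista, cur, corpo)).1.map pvRenderA := by
  induction lines with
  | nil => intro lista cur corpo; rfl
  | cons raw rest ih =>
    intro lista cur corpo
    simp only [List.foldl_cons]
    by_cases hc : PySem.Chars.startswith (PySem.Chars.strip raw) ['c', 'l', 'a', 's', 's'] = true
    · -- class line: B flushes iff a class is active, exactly A's conditional append
      rw [pvStepA_class lista cur corpo raw hc]
      rw [show pvStepB (lista.map pvRenderA, cur.isSome, cur, pvAttrsOf corpo, pvMethLines corpo) raw =
          ((if cur.isSome then lista.map pvRenderA ++ [pvFlushB cur (pvAttrsOf corpo) (pvMethLines corpo)]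
              else lista.map pvRenderA), true,
            some ((PySem.Chars.split₀ (PySem.Chars.strip raw)).getD 1 []), [], []) by
        simp [pvStepB, hc]]
      have hmap : (if cur.isSome then lista.map pvRenderA ++
            [pvFlushB cur (pvAttrsOf corpo) (pvMethLines corpo)] else lista.map pvRenderA) =
          (if cur.isSome then lista ++ [(cur, corpo)] else lista).map pvRenderA := by
        cases cur <;> simp [pvRender_eq]
      rw [hmap]
      have := ih (if cur.isSome then lista ++ [(cur, corpo)] else lista)
        (some ((PySem.Chars.split₀ (PySem.Chars.strip raw)).getD 1 [])) []
      simpa [pvAttrsOf, pvMethLines] using this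
    · have hc' : PySem.Chars.startswith (PySem.Chars.strip raw) ['c', 'l', 'a', 's', 's'] = false := by
        simpa using hc
      by_cases hb : PySem.Chars.strip raw = ['}']
      · -- closing brace: flush (possibly None-named)
        rw [pvStepA_brace lista cur corpo raw hb]
        rw [show pvStepB (lista.map pvRenderA, cur.isSome, cur, pvAttrsOf corpo, pvMethLines corpo) raw =
            (lista.map pvRenderA ++ [pvFlushB cur (pvAttrsOf corpo) (pvMethLines corpo)],
              false, none, [], []) by
          simp [pvStepB, hb]; try decide]
        have := ih (lista ++ [(cur, corpo)]) none []
        simpa [pvAttrsOf, pvMethLines, pvRender_eq] using this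
      · -- body line
        rw [pvStepA_body lista cur corpo raw hc' hb]
        have hA : pvAttrsOf (corpo ++ [PySem.Chars.strip raw]) =
            (pvStepClassify (corpo.foldl pvStepClassify ([], [])) (PySem.Chars.strip raw)).1.map Prod.snd := by
          simp [pvAttrsOf, List.foldl_append]
        have key := ih lista cur (corpo ++ [PySem.Chars.strip raw])
        rw [hA] at key
        by_cases hcol : PySem.Chars.isIn [':'] (PySem.Chars.strip raw) = true
        · rw [show pvStepB (lista.map pvRenderA, cur.isSome, cur, pvAttrsOf corpo, pvMethLines corpo) raw =
              (lista.map pvRenderA, cur.isSome, cur,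
                pvAttrsOf corpo ++ [PySem.Chars.strip
                  ((PySem.Chars.splitOn (PySem.Chars.strip raw) ":".toList).getD 1 [])],
                pvMethLines corpo) by
            simp [pvStepB, hc', hb, hcol]]
          simpa [pvStepClassify, hcol, pvAttrsOf, pvMethLines] using key
        · have hcol' : PySem.Chars.isIn [':'] (PySem.Chars.strip raw) = false := by
            simpa using hcol
          by_cases hv : PySem.Chars.isIn ['v', 'o', 'i', 'd'] (PySem.Chars.strip raw) = true
          · rw [show pvStepB (lista.map pvRenderA, cur.isSome, cur, pvAttrsOf corpo, pvMethLines corpo) raw =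
                (lista.map pvRenderA, cur.isSome, cur, pvAttrsOf corpo,
                  pvMethLines corpo ++ [PySem.Chars.strip raw]) by
              simp [pvStepB, hc', hb, hcol', hv]]
            simpa [pvStepClassify, hcol', hv, pvAttrsOf, pvMethLines] using key
          · have hv' : PySem.Chars.isIn ['v', 'o', 'i', 'd'] (PySem.Chars.strip raw) = false := by
              simpa using hv
            rw [show pvStepB (lista.map pvRenderA, cur.isSome, cur, pvAttrsOf corpo, pvMethLines corpo) raw =
                (lista.map pvRenderA, cur.isSome, cur, pvAttrsOf corpo, pvMethLines corpo) by
              simp [pvStepB, hc', hb, hcol', hv']]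
            simpa [pvStepClassify, hcol', hv', pvAttrsOf, pvMethLines] using key

-- ===== VERDICT (by name: the statement is the Claim_ definition above) =====
theorem generate_php_class_spec : Claim_equal_generate_php_class := by
  intro uml _ _
  unfold Spec_generate_php_class generate_php_class generate_php_class_alt
  have := pvLoop_eq (PySem.Chars.splitlines (pvClean uml)) [] none []
  simp only [List.map_nil, Option.isSome_none] at this
  rw [show pvAttrsOf [] = [] from rfl, show pvMethLines [] = [] from rfl] at this
  simp [this]
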